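-- pv_equiv track=rewrite | github.com/antonioclim/TAOCT4researchers | 03UNIT - Algorithmic Complexity (performance)/exercises/practice/easy_03_loop_analysis.py | func_e
-- ===== SOURCE A (Python) =====
-- def func_e(n: int) -> int:
--     """
--     Analyse the time complexity of this function.
--
--     TODO: What is the time complexity? O(?)
--     """
--     count = 0
--     for i in range(n):
--         j = 1
--         while j < n:
--             count += 1
--             j *= 2
--     return count
-- ===== SOURCE B (Python) =====
-- def func_e(n: int) -> int:
--     # Closed form: each of the n outer iterations runs the inner doubling loop
--     # ceil(log2(n)) = (n-1).bit_length() times (for n >= 2); 0 otherwise.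
--     if n < 2:
--         return 0
--     return n * (n - 1).bit_length()
-- ===== Notes on version B (the rewrite author's own statement) =====
-- stated objective: faster
-- what changed: Replaced the O(n log n) nested loops by the closed form n * (n-1).bit_length() (0 for n < 2).
import Mathlib
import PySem

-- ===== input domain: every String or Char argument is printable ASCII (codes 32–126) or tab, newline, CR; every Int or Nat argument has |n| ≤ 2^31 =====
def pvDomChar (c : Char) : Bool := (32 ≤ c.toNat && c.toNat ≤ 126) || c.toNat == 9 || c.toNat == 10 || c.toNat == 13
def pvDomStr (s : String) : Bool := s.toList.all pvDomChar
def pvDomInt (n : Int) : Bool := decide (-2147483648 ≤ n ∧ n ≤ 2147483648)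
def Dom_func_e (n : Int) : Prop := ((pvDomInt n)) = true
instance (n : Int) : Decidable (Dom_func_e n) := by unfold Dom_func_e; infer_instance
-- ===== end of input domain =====

-- B replaces A's nested loops by the closed form n * bit_length(n-1); objective: faster (asymptotic).

-- ===== PORT A =====
-- inner 'while j < n: count += 1; j *= 2' loop; the 1 ≤ j invariant is carried for termination
def funcEInner (n j count : Int) (hj : 1 ≤ j) : Int :=
  if h : j < n then funcEInner n (j * 2) (count + 1) (by omega) else count
termination_by (n - j).toNat
decreasing_by omega

def func_e (n : Int) : Int :=
  (PySem.List.pyRange 0 n 1).foldl (fun count _ => funcEInner n 1 count (by norm_num)) 0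

-- ===== PORT B =====
-- (n-1).bit_length() for n ≥ 2 is Nat.log2 (n-1) + 1
def func_e_alt (n : Int) : Int :=
  if n < 2 then 0 else n * ((Nat.log2 (n - 1).toNat + 1 : Nat) : Int)

-- ===== PRECONDITION & SPEC =====
def Spec_func_e (n : Int) (out : Int) : Prop := out = func_e_alt n
instance (n : Int) (out : Int) : Decidable (Spec_func_e n out) := by unfold Spec_func_e; infer_instance

-- ===== CLAIM (what is proved, stated in full; the proofs are below) =====
def Claim_equal_func_e : Prop := ∀ (n : Int), Dom_func_e n → Spec_func_e n (func_e n)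

-- ===== LEMMAS AND PROOFS =====

-- number of iterations of the inner loop started at j
def pvIter (n j : Int) : Int :=
  if j < n then ((Nat.log 2 ((n - 1).toNat / j.toNat) + 1 : Nat) : Int) else 0

lemma pvIter_step (n j : Int) (hj : 1 ≤ j) (h : j < n) :
    pvIter n j = 1 + pvIter n (j * 2) := by
  have hj' : 0 < j.toNat := by omega
  unfold pvIter
  by_cases h2 : j * 2 < n
  · simp only [if_pos h, if_pos h2]
    have hdd : (n - 1).toNat / (j * 2).toNat = ((n - 1).toNat / j.toNat) / 2 := by
      have : (j * 2).toNat = j.toNat * 2 := by omega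
      rw [this, ← Nat.div_div_eq_div_mul]
    have hge : 2 ≤ (n - 1).toNat / j.toNat := by
      rw [Nat.le_div_iff_mul_le hj']; omega
    have hpos : 0 < Nat.log 2 ((n - 1).toNat / j.toNat) := Nat.log_pos (by omega) hge
    rw [hdd, Nat.log_div_base]
    push_cast [Nat.sub_add_cancel hpos]
    omega
  · simp only [if_pos h, if_neg h2]
    have hlt : (n - 1).toNat / j.toNat < 2 := by
      rw [Nat.div_lt_iff_lt_mul hj']; omega
    rw [Nat.log_eq_zero_iff.2 (Or.inl hlt)]
    simp

lemma funcEInner_eq (n : Int) : ∀ (j count : Int) (hj : 1 ≤ j),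
    funcEInner n j count hj = count + pvIter n j := by
  intro j count hj
  fun_induction funcEInner n j count hj with
  | case1 j count hj h ih =>
      rw [ih, pvIter_step n j hj h]; ring
  | case2 j count hj h =>
      unfold pvIter
      simp [h]

lemma foldl_const_add (K : Int) (l : List Int) : ∀ (c : Int),
    l.foldl (fun count (_ : Int) => count + K) c = c + l.length * K := by
  induction l with
  | nil => intro c; simp
  | cons x xs ih => intro c; simp [List.foldl, ih]; ring

-- ===== VERDICT (by name: the statement is the Claim_ definition above) =====
theorem func_e_spec : Claim_equal_func_e := by
  intro n _
  unfold Spec_func_e func_e func_e_alt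
  have hfold : (PySem.List.pyRange 0 n 1).foldl
      (fun count _ => funcEInner n 1 count (by norm_num)) 0
      = 0 + (PySem.List.pyRange 0 n 1).length * pvIter n 1 := by
    have : (fun count (_ : Int) => funcEInner n 1 count (by norm_num))
        = fun count (_ : Int) => count + pvIter n 1 := by
      funext c x; exact funcEInner_eq n 1 c (by norm_num)
    rw [this, foldl_const_add]
  rw [hfold, PySem.List.length_pyRange_one]
  by_cases h2 : n < 2
  · rw [if_pos h2]
    by_cases hn : n ≤ 0
    · have hz : ((n - 0).toNat : Int) = 0 := by omega
      rw [hz]; ring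
    · have hn1 : n = 1 := by omega
      subst hn1
      have hp : pvIter 1 1 = 0 := by unfold pvIter; norm_num
      rw [hp]; ring
  · have h1 : (1 : Int) < n := by omega
    have hIter : pvIter n 1 = ((Nat.log2 (n - 1).toNat + 1 : Nat) : Int) := by
      unfold pvIter
      simp [h1, Nat.log2_eq_log_two]
    rw [hIter, if_neg h2]
    have : ((n - 0).toNat : Int) = n := by omega
    push_cast
    rw [sub_zero]
    rw [Int.toNat_of_nonneg (by omega : (0:Int) ≤ n)]
    ring
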